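-- pv_equiv track=rewrite | github.com/phuctruong/solace-browser | tests/test_capture_pipeline.py | _make_large_html
-- ===== SOURCE A (Python) =====
-- LARGE_HTML_PREFIX = """\
-- <!DOCTYPE html>
-- <html lang="en">
-- <head><meta charset="UTF-8"><title>Large Page</title></head>
-- <body>
-- """
--
-- LARGE_HTML_SUFFIX = "</body></html>"
--
-- def _make_large_html(target_bytes: int = 120_000) -> str:
--     """Generate HTML content that exceeds target_bytes in size."""
--     paragraph = "<p>" + ("Lorem ipsum dolor sit amet. " * 20) + "</p>\n"
--     body_lines = []
--     current_size = len(LARGE_HTML_PREFIX) + len(LARGE_HTML_SUFFIX)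
--     while current_size < target_bytes:
--         body_lines.append(paragraph)
--         current_size += len(paragraph)
--     return LARGE_HTML_PREFIX + "".join(body_lines) + LARGE_HTML_SUFFIX
-- ===== SOURCE B (Python) =====
-- LARGE_HTML_PREFIX = """\
-- <!DOCTYPE html>
-- <html lang="en">
-- <head><meta charset="UTF-8"><title>Large Page</title></head>
-- <body>
-- """
--
-- LARGE_HTML_SUFFIX = "</body></html>"
--
-- def _make_large_html(target_bytes: int = 120_000) -> str:
--     """Generate HTML content that exceeds target_bytes in size."""
--     paragraph = "<p>" + ("Lorem ipsum dolor sit amet. " * 20) + "</p>\n"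
--     base = len(LARGE_HTML_PREFIX) + len(LARGE_HTML_SUFFIX)
--     # smallest count >= 0 with base + count*len(paragraph) >= target_bytes
--     count = -((base - target_bytes) // len(paragraph))
--     return LARGE_HTML_PREFIX + paragraph * count + LARGE_HTML_SUFFIX
-- ===== Notes on version B (the rewrite author's own statement) =====
-- stated objective: faster
-- what changed: Replaces the while-loop that appends paragraphs one at a time with a closed-form ceiling-division count and a single string repetition.
import Mathlib
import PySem

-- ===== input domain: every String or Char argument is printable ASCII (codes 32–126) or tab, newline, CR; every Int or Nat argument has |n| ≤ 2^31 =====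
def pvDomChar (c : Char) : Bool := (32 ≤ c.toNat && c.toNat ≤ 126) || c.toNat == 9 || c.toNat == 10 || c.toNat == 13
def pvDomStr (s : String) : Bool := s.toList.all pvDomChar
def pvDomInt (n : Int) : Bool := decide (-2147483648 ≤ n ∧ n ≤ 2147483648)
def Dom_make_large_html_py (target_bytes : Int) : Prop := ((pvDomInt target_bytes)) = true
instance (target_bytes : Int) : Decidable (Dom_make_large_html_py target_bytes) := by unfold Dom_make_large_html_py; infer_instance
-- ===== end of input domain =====

-- B replaces A's paragraph-appending while-loop by a closed-form floor-division count
-- and one string repetition (objective: faster by a constant factor / simpler).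

-- module constants, shared verbatim by both Pythons (ported on List Char)
def pvPrefix : List Char := "<!DOCTYPE html>\n<html lang=\"en\">\n<head><meta charset=\"UTF-8\"><title>Large Page</title></head>\n<body>\n".toList
def pvSuffix : List Char := "</body></html>".toList
-- paragraph = "<p>" + ("Lorem ipsum dolor sit amet. " * 20) + "</p>\n"
def pvPara : List Char :=
  "<p>".toList ++ (List.replicate 20 "Lorem ipsum dolor sit amet. ".toList).flatten ++ "</p>\n".toList

set_option maxRecDepth 4000 in
theorem pvPara_len : (pvPara.length : Int) = 568 := by decide

-- ===== PORT A =====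
-- while current_size < target_bytes: body_lines.append(paragraph); current_size += len(paragraph)
def pvLoopA (target current : Int) (acc : List (List Char)) : List (List Char) :=
  if current < target then
    pvLoopA target (current + (pvPara.length : Int)) (acc ++ [pvPara])
  else acc
termination_by (target - current).toNat
decreasing_by
  have h : (pvPara.length : Int) = 568 := pvPara_len
  rw [h]; omega

def make_large_html_py (target_bytes : Int) : String :=
  String.ofList (pvPrefix ++
    (pvLoopA target_bytes ((pvPrefix.length : Int) + (pvSuffix.length : Int)) []).flatten
    ++ pvSuffix)

-- ===== PORT B =====
def make_large_html_py_alt (target_bytes : Int) : String :=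
  let base : Int := (pvPrefix.length : Int) + (pvSuffix.length : Int)
  let count : Int := -(PySem.Int.floordiv (base - target_bytes) (pvPara.length : Int))
  -- paragraph * count (str * int: empty for count ≤ 0)
  String.ofList (pvPrefix ++ (List.replicate count.toNat pvPara).flatten ++ pvSuffix)

-- ===== PRECONDITION & SPEC =====
def Spec_make_large_html_py (target_bytes : Int) (out : String) : Prop := out = make_large_html_py_alt target_bytes
instance (target_bytes : Int) (out : String) : Decidable (Spec_make_large_html_py target_bytes out) := by unfold Spec_make_large_html_py; infer_instance

-- ===== CLAIM (what is proved, stated in full; the proofs are below) =====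
def Claim_equal_make_large_html_py : Prop := ∀ (target_bytes : Int), Dom_make_large_html_py target_bytes → Spec_make_large_html_py target_bytes (make_large_html_py target_bytes)

-- ===== LEMMAS AND PROOFS =====

-- A's loop appends exactly max(0, ⌈(target-current)/568⌉) copies of the paragraph,
-- i.e. (-(floordiv (current - target) 568)).toNat copies.
theorem pvLoopA_aux (target : Int) : ∀ (n : Nat) (current : Int), (target - current).toNat = n →
    ∀ acc, pvLoopA target current acc =
      acc ++ List.replicate (-(PySem.Int.floordiv (current - target) 568)).toNat pvPara := by
  intro n
  induction n using Nat.strong_induction_on with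
  | _ n ih =>
    intro current hn acc
    rw [pvLoopA]
    have hfd : ∀ a : Int, PySem.Int.floordiv a 568 = a / 568 := by
      intro a; simp [PySem.Int.floordiv, Int.fdiv_eq_ediv]
    by_cases h : current < target
    · rw [if_pos h, pvPara_len,
        ih ((target - (current + 568)).toNat) (by omega) (current + 568) rfl]
      rw [List.append_assoc]
      congr 1
      rw [hfd, hfd]
      have hrep : (-(((current - target)) / 568)).toNat =
          (-(((current + 568 - target)) / 568)).toNat + 1 := by omega
      rw [hrep]
      simp [List.replicate_succ]
    · rw [if_neg h, hfd]
      have : (-((current - target) / 568)).toNat = 0 := by omega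
      simp [this]

theorem pvLoopA_eq (target current : Int) (acc : List (List Char)) :
    pvLoopA target current acc =
      acc ++ List.replicate (-(PySem.Int.floordiv (current - target) 568)).toNat pvPara :=
  pvLoopA_aux target _ current rfl acc

-- ===== VERDICT (by name: the statement is the Claim_ definition above) =====
theorem make_large_html_py_spec : Claim_equal_make_large_html_py := by
  intro t _
  unfold Spec_make_large_html_py make_large_html_py make_large_html_py_alt
  rw [pvLoopA_eq]
  simp [pvPara_len]
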